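-- pv_equiv track=rewrite | github.com/AhmedKabbary/DSS-Tasks | tasks/algorithms/methods.py | maximin
-- ===== SOURCE A (Python) =====
-- def maximin(rows: int, columns: int, matrix) -> str:
--     maxPays = []
--     for r in range(rows):
--         values = []
--         for c in range(columns):
--             num = matrix[r][c]
--             values.append(num)
--         maxPays.append(min(values))
--     maxPay = max(maxPays)
--
--     project = f"project {maxPays.index(maxPay) + 1}"
--     return f"{maxPay} {project}"
-- ===== SOURCE B (Python) =====
-- def maximin(rows: int, columns: int, matrix) -> str:
--     mins = [min(matrix[r][:columns]) for r in range(rows)]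
--     ranking = sorted(range(rows), key=lambda r: -mins[r])
--     best = ranking[0]
--     return f"{mins[best]} project {best + 1}"
-- ===== Notes on version B (the rewrite author's own statement) =====
-- stated objective: alternative
-- what changed: Replaces the collect-minima-then-max()-then-list.index() pipeline by a stable sort of the row indices by descending row minimum and taking the top-ranked row (stability preserves A's first-row tie-break); the inner element-copy loop becomes a slice-and-min comprehension.
import Mathlib
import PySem

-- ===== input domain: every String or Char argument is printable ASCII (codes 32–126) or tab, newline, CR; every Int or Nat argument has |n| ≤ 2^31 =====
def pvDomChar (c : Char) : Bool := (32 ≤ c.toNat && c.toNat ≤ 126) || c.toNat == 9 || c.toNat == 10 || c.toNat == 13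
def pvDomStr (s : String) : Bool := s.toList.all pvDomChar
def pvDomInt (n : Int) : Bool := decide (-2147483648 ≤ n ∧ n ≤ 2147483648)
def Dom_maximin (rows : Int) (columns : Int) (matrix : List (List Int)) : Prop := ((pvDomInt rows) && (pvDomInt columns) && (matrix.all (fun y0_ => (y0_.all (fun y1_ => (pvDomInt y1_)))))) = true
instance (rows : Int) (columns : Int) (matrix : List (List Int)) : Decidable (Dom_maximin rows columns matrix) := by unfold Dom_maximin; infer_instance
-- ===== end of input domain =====

-- B: ranks the row indices by descending row minimum with a stable sort and takes the
-- top-ranked row, instead of A's collect-minima / max() / list.index() pipeline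
-- (objective: alternative — stability preserves A's first-row tie-break).

-- ===== PORT A =====
-- A, step for step: build maxPays by the two nested range-loops, then max, then index.
-- pyGetD defaults and the `none => 0/""` arms are only reached where Python raises (outside Pre_).
def maximin (rows : Int) (columns : Int) (matrix : List (List Int)) : String :=
  let maxPays : List Int :=
    (PySem.List.pyRange 0 rows 1).foldl (fun mp r =>
      let values : List Int :=
        (PySem.List.pyRange 0 columns 1).foldl (fun vs c =>
          let num := PySem.List.pyGetD (PySem.List.pyGetD matrix r []) c 0
          vs ++ [num]) []
      mp ++ [(PySem.List.min? values (fun x => x)).getD 0]) []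
  match PySem.List.max? maxPays (fun x => x) with
  | none => ""  -- max([]) raises ValueError: excluded by Pre_
  | some maxPay =>
    let project := "project " ++ PySem.Int.toStr (((PySem.List.index? maxPays maxPay).getD 0 : Int) + 1)
    PySem.Int.toStr maxPay ++ " " ++ project

-- ===== PORT B =====
-- B, step for step: the mins comprehension, the stable sort of the indices by -mins[r],
-- the [0] lookup and the final format.
def maximin_alt (rows : Int) (columns : Int) (matrix : List (List Int)) : String :=
  let mins : List Int :=
    (PySem.List.pyRange 0 rows 1).map (fun r =>
      (PySem.List.min? (PySem.List.slice (PySem.List.pyGetD matrix r []) none (some columns)) (fun x => x)).getD 0)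
  let ranking := PySem.List.sorted (PySem.List.pyRange 0 rows 1) (fun r => -(PySem.List.pyGetD mins r 0))
  match PySem.List.pyGet? ranking 0 with
  | none => ""  -- ranking[0] raises IndexError when there are no rows: excluded by Pre_
  | some best =>
    PySem.Int.toStr (PySem.List.pyGetD mins best 0) ++ " project " ++ PySem.Int.toStr (best + 1)

-- ===== PRECONDITION & SPEC =====
-- Pre_: exactly the inputs where A returns normally — at least one row and one column scanned,
-- the matrix has the scanned rows, and each scanned row has the scanned columns
-- (otherwise A raises IndexError, or ValueError from min([])/max([])).
def Pre_maximin (rows : Int) (columns : Int) (matrix : List (List Int)) : Prop :=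
  0 < rows ∧ rows ≤ (matrix.length : Int) ∧ 0 < columns ∧
    ∀ row ∈ matrix.take rows.toNat, columns ≤ (row.length : Int)
instance (rows : Int) (columns : Int) (matrix : List (List Int)) : Decidable (Pre_maximin rows columns matrix) := by unfold Pre_maximin; infer_instance

def pvWitness_maximin : Int × Int × List (List Int) := (2, 2, [[1, 4], [3, 2]])

def Spec_maximin (rows : Int) (columns : Int) (matrix : List (List Int)) (out : String) : Prop := out = maximin_alt rows columns matrix
instance (rows : Int) (columns : Int) (matrix : List (List Int)) (out : String) : Decidable (Spec_maximin rows columns matrix out) := by unfold Spec_maximin; infer_instance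

-- ===== CLAIM (what is proved, stated in full; the proofs are below) =====
def Claim_equal_maximin : Prop := ∀ (rows : Int) (columns : Int) (matrix : List (List Int)), Dom_maximin rows columns matrix → Pre_maximin rows columns matrix → Spec_maximin rows columns matrix (maximin rows columns matrix)

-- ===== LEMMAS AND PROOFS =====

-- proof-only helpers -------------------------------------------------------

-- the row-minimum of row r (what both programs compute per admitted row)
def gRow (matrix : List (List Int)) (columns : Int) (r : Int) : Int :=
  (PySem.List.min? ((PySem.List.pyGetD matrix r []).take columns.toNat) (fun x => x)).getD 0

-- the running (best value, best index) tracker: what the head of B's stable sort realises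
def trk (g : Int → Int) (best : Option (Int × Int)) (r : Int) : Option (Int × Int) :=
  match best with
  | none => some (g r, r)
  | some (bv, bi) => if g r > bv then some (g r, r) else some (bv, bi)

-- the running first-strict-minimum by key k (the head of the insertion sort)
def runMin (k : Int → Int) (acc : Option Int) (x : Int) : Option Int :=
  match acc with
  | none => some x
  | some m => if k x < k m then some x else some m

theorem foldl_snoc_map {α β : Type} (f : α → β) : ∀ (l : List α) (init : List β),
    l.foldl (fun acc x => acc ++ [f x]) init = init ++ l.map f := by
  intro l
  induction l with
  | nil => intro init; simp
  | cons x t ih => intro init; simp [List.foldl_cons, ih]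

theorem map_pyRange_take (row : List Int) (columns : Int) (_h0 : 0 ≤ columns)
    (hle : columns ≤ (row.length : Int)) :
    (PySem.List.pyRange 0 columns 1).map (fun c => PySem.List.pyGetD row c 0)
      = row.take columns.toNat := by
  apply List.ext_getElem
  · simp [PySem.List.length_pyRange_one]
    omega
  · intro i h1 h2
    have hi : i < columns.toNat := by
      simpa [PySem.List.length_pyRange_one] using h1
    have hilen : i < row.length := by omega
    rw [List.getElem_map, PySem.List.getElem_pyRange_one]
    rw [List.getElem_take]
    have : (0 : Int) + (i : Int) = ((i : Nat) : Int) := by ring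
    rw [this, PySem.List.pyGetD_natCast]
    simp [List.getD, hilen]

theorem max?_id_append (l : List Int) (M y : Int)
    (h : PySem.List.max? l (fun x => x) = some M) :
    PySem.List.max? (l ++ [y]) (fun x => x) = some (max M y) := by
  have hne : l ≠ [] := by
    intro hl; rw [hl, (PySem.List.max?_eq_none_iff _ _).mpr rfl] at h
    simp at h
  obtain ⟨x, t, rfl⟩ := List.exists_cons_of_ne_nil hne
  rw [PySem.List.max?_id_cons] at h
  have hM : t.foldl max x = M := Option.some.inj h
  rw [List.cons_append, PySem.List.max?_id_cons, List.foldl_append]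
  simp [hM]

-- the tracker over range(n) computes the max of the minima and its FIRST index
theorem tracker_core (g : Int → Int) : ∀ (n : Nat), 0 < n →
    ∃ (M : Int) (I : Nat),
      (PySem.List.pyRange 0 (n : Int) 1).foldl (trk g) none = some (M, (I : Int)) ∧
      PySem.List.max? ((PySem.List.pyRange 0 (n : Int) 1).map g) (fun x => x) = some M ∧
      PySem.List.index? ((PySem.List.pyRange 0 (n : Int) 1).map g) M = some I := by
  intro n
  induction n with
  | zero => intro h; omega
  | succ n ih =>
    intro _
    by_cases hn : 0 < n
    · obtain ⟨M, I, hfold, hmax, hidx⟩ := ih hn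
      have hsplit : PySem.List.pyRange 0 ((n + 1 : Nat) : Int) 1
          = PySem.List.pyRange 0 (n : Int) 1 ++ [(n : Int)] := by
        have : ((n + 1 : Nat) : Int) = (n : Int) + 1 := by push_cast; ring_nf
        rw [this, PySem.List.pyRange_one_succ_right (by positivity)]
      have hlen : ((PySem.List.pyRange 0 (n : Int) 1).map g).length = n := by
        simp [PySem.List.length_pyRange_one]
      rw [hsplit, List.foldl_append, hfold, List.map_append, List.map_singleton]
      by_cases hgt : g (n : Int) > M
      · refine ⟨g (n : Int), n, ?_, ?_, ?_⟩
        · simp [trk, hgt]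
        · rw [max?_id_append _ M _ hmax]
          simp [max_eq_right (le_of_lt hgt)]
        · have hnotmem : g (n : Int) ∉ (PySem.List.pyRange 0 (n : Int) 1).map g := by
            intro hmem
            have := PySem.List.max?_isMax hmax _ hmem
            simp at this; omega
          rw [PySem.List.index?_append_singleton_self _ _ hnotmem, hlen]
      · refine ⟨M, I, ?_, ?_, ?_⟩
        · simp [trk, hgt]
        · rw [max?_id_append _ M _ hmax]
          simp [max_eq_left (by omega : g (n : Int) ≤ M)]
        · rw [PySem.List.index?_append_of_mem _ (PySem.List.max?_mem hmax), hidx]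
    · have hn0 : n = 0 := by omega
      subst hn0
      refine ⟨g 0, 0, ?_, ?_, ?_⟩
      · have h01 : ((0 + 1 : Nat) : Int) = 0 + 1 := by norm_num
        rw [h01, PySem.List.pyRange_one_singleton]
        simp [trk]
      · have h01 : ((0 + 1 : Nat) : Int) = 0 + 1 := by norm_num
        rw [h01, PySem.List.pyRange_one_singleton, List.map_singleton]
        rw [PySem.List.max?_id_cons]; simp
      · have h01 : ((0 + 1 : Nat) : Int) = 0 + 1 := by norm_num
        rw [h01, PySem.List.pyRange_one_singleton, List.map_singleton]
        rw [PySem.List.index?_cons_self]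

-- the head of insertBy is the strict-< update of the old head
theorem head?_insertBy (before : Int → Int → Bool) (x : Int) (ys : List Int) :
    (PySem.List.insertBy before x ys).head? =
      match ys.head? with
      | none => some x
      | some m => if before x m then some x else some m := by
  cases ys with
  | nil => rfl
  | cons m t =>
    by_cases h : before x m
    · simp [PySem.List.insertBy, h]
    · simp [PySem.List.insertBy, h]

-- the head of the stable insertion sort is the running first-strict-minimum of the key
theorem head?_sorted_foldl (k : Int → Int) : ∀ (l : List Int) (acc : List Int),
    (l.foldl (fun acc x => PySem.List.insertBy (fun a b => decide (k a < k b)) x acc) acc).head?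
      = l.foldl (runMin k) acc.head? := by
  intro l
  induction l with
  | nil => intro acc; rfl
  | cons x t ih =>
    intro acc
    rw [List.foldl_cons, List.foldl_cons, ih, head?_insertBy]
    cases acc with
    | nil => rfl
    | cons m r =>
      by_cases h : k x < k m <;> simp [runMin, h]

theorem head?_sorted (k : Int → Int) (l : List Int) :
    (PySem.List.sorted l k).head? = l.foldl (runMin k) none := by
  rw [PySem.List.sorted_eq_foldl_insertBy]
  exact head?_sorted_foldl k l []

-- runMin with key -g is the (value,index) tracker of g, projected to the index
theorem runMin_trk (g : Int → Int) (k : Int → Int) : ∀ (l : List Int) (b : Int),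
    (∀ x ∈ l, k x = -(g x)) → k b = -(g b) →
    l.foldl (trk g) (some (g b, b)) = (l.foldl (runMin k) (some b)).map (fun r => (g r, r)) := by
  intro l
  induction l with
  | nil => intro b _ _; rfl
  | cons x t ih =>
    intro b hl hb
    have hx : k x = -(g x) := hl x (List.mem_cons_self ..)
    have ht : ∀ y ∈ t, k y = -(g y) := fun y hy => hl y (List.mem_cons_of_mem _ hy)
    rw [List.foldl_cons, List.foldl_cons]
    by_cases h : g x > g b
    · have hk : k x < k b := by rw [hx, hb]; omega
      simp only [trk, runMin, if_pos h, if_pos hk]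
      exact ih x ht hx
    · have hk : ¬ k x < k b := by rw [hx, hb]; omega
      simp only [trk, runMin, if_neg h, if_neg hk]
      exact ih b ht hb

theorem runMin_trk_none (g : Int → Int) (k : Int → Int) (l : List Int)
    (hl : ∀ x ∈ l, k x = -(g x)) :
    l.foldl (trk g) none = (l.foldl (runMin k) none).map (fun r => (g r, r)) := by
  cases l with
  | nil => rfl
  | cons x t =>
    rw [List.foldl_cons, List.foldl_cons]
    show t.foldl (trk g) (some (g x, x)) = _
    exact runMin_trk g k t x (fun y hy => hl y (List.mem_cons_of_mem _ hy))
      (hl x (List.mem_cons_self ..))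

-- ===== VERDICT (by name: the statement is the Claim_ definition above) =====

theorem maximin_spec : Claim_equal_maximin := by
  intro rows columns matrix _ hpre
  obtain ⟨hr0, hrlen, hc0, hcols⟩ := hpre
  unfold Spec_maximin maximin maximin_alt
  set n : Nat := rows.toNat with hn
  have hrn : rows = (n : Int) := by omega
  have hn0 : 0 < n := by omega
  -- every per-row value computed by A and by B is gRow matrix columns r
  have hrowlen : ∀ r : Int, 0 ≤ r → r < rows →
      columns ≤ ((PySem.List.pyGetD matrix r []).length : Int) := by
    intro r hge0 h1
    have h0 : (0:Int) ≤ r := hge0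
    have hrlt : r.toNat < matrix.length := by omega
    rw [PySem.List.pyGetD_eq_getElem matrix ([] : List Int) h0 (by omega)]
    apply hcols
    have htake : (matrix.take rows.toNat)[r.toNat]'(by
        rw [List.length_take]; omega) = matrix[r.toNat] := List.getElem_take ..
    rw [← htake]; exact List.getElem_mem _
  -- A's maxPays is the map of gRow over range(rows)
  have hA : (PySem.List.pyRange 0 rows 1).foldl (fun mp r =>
      mp ++ [(PySem.List.min? ((PySem.List.pyRange 0 columns 1).foldl (fun vs c =>
        vs ++ [PySem.List.pyGetD (PySem.List.pyGetD matrix r []) c 0]) [])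
        (fun x => x)).getD 0]) []
      = (PySem.List.pyRange 0 rows 1).map (gRow matrix columns) := by
    rw [foldl_snoc_map (fun r => (PySem.List.min? ((PySem.List.pyRange 0 columns 1).foldl
        (fun vs c => vs ++ [PySem.List.pyGetD (PySem.List.pyGetD matrix r []) c 0]) [])
        (fun x => x)).getD 0) (PySem.List.pyRange 0 rows 1) []]
    rw [List.nil_append]
    apply List.map_congr_left
    intro r hr
    rw [PySem.List.mem_pyRange_one] at hr
    rw [foldl_snoc_map (fun c => PySem.List.pyGetD (PySem.List.pyGetD matrix r []) c 0)
        (PySem.List.pyRange 0 columns 1) []]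
    rw [List.nil_append,
        map_pyRange_take _ _ (le_of_lt hc0) (hrowlen r hr.1 hr.2)]
    rfl
  -- B's mins is the same map (slice = take)
  have hB : (PySem.List.pyRange 0 rows 1).map (fun r =>
      (PySem.List.min? (PySem.List.slice (PySem.List.pyGetD matrix r []) none (some columns))
        (fun x => x)).getD 0)
      = (PySem.List.pyRange 0 rows 1).map (gRow matrix columns) := by
    apply List.map_congr_left
    intro r _
    rw [PySem.List.slice_to _ (le_of_lt hc0)]
    rfl
  rw [hA]
  simp only [hB]
  set g := gRow matrix columns with hg
  -- mins[r] = g r for r in range(rows)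
  have hminsr : ∀ r ∈ PySem.List.pyRange 0 rows 1,
      PySem.List.pyGetD ((PySem.List.pyRange 0 rows 1).map g) r 0 = g r := by
    intro r hr
    rw [PySem.List.mem_pyRange_one] at hr
    have hrnat : r = ((r.toNat : Nat) : Int) := by omega
    have hlt : r.toNat < ((PySem.List.pyRange 0 rows 1).map g).length := by
      rw [List.length_map, PySem.List.length_pyRange_one]; omega
    rw [hrnat, PySem.List.pyGetD_natCast, List.getD_eq_getElem _ _ hlt,
      List.getElem_map, PySem.List.getElem_pyRange_one]
    congr 1
    omega
  obtain ⟨M, I, hfold, hmax, hidx⟩ := tracker_core g n hn0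
  rw [hrn] at hA hB hminsr ⊢
  simp only [hmax, hidx]
  -- B's ranking head is the tracker's index
  have hhead : (PySem.List.sorted (PySem.List.pyRange 0 ((n : Nat) : Int) 1)
      (fun r => -(PySem.List.pyGetD ((PySem.List.pyRange 0 ((n : Nat) : Int) 1).map g) r 0))).head?
      = some ((I : Nat) : Int) := by
    rw [head?_sorted]
    have hconv := runMin_trk_none g
      (fun r => -(PySem.List.pyGetD ((PySem.List.pyRange 0 ((n : Nat) : Int) 1).map g) r 0))
      (PySem.List.pyRange 0 ((n : Nat) : Int) 1)
      (fun x hx => by simp only [hminsr x hx])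
    rw [hconv] at hfold
    cases hres : (PySem.List.pyRange 0 ((n : Nat) : Int) 1).foldl
        (runMin (fun r => -(PySem.List.pyGetD ((PySem.List.pyRange 0 ((n : Nat) : Int) 1).map g) r 0))) none with
    | none => rw [hres] at hfold; simp at hfold
    | some r =>
      rw [hres] at hfold
      simp only [Option.map_some] at hfold
      have hpair := Option.some.inj hfold
      have : r = (I : Int) := congrArg Prod.snd hpair
      rw [this]
  have hmem : ((I : Nat) : Int) ∈ PySem.List.pyRange 0 ((n : Nat) : Int) 1 := by
    have hne : PySem.List.sorted (PySem.List.pyRange 0 ((n : Nat) : Int) 1)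
        (fun r => -(PySem.List.pyGetD ((PySem.List.pyRange 0 ((n : Nat) : Int) 1).map g) r 0)) ≠ [] := by
      intro h; rw [h] at hhead; simp at hhead
    have hh := List.head?_eq_some_head hne ▸ hhead
    have hmem' : ((I : Nat) : Int) ∈ PySem.List.sorted (PySem.List.pyRange 0 ((n : Nat) : Int) 1)
        (fun r => -(PySem.List.pyGetD ((PySem.List.pyRange 0 ((n : Nat) : Int) 1).map g) r 0)) := by
      rw [← Option.some.inj hh]
      exact List.head_mem hne
    exact (PySem.List.mem_sorted ..).mp hmem'
  have hgI : PySem.List.pyGetD ((PySem.List.pyRange 0 ((n : Nat) : Int) 1).map g) ((I : Nat) : Int) 0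
      = g ((I : Nat) : Int) := hminsr _ hmem
  -- gRow I = M: the tracker stores (g I, I)
  have hgIM : g ((I : Nat) : Int) = M := by
    have hconv := runMin_trk_none g
      (fun r => -(PySem.List.pyGetD ((PySem.List.pyRange 0 ((n : Nat) : Int) 1).map g) r 0))
      (PySem.List.pyRange 0 ((n : Nat) : Int) 1)
      (fun x hx => by simp only [hminsr x hx])
    rw [hconv] at hfold
    cases hres : (PySem.List.pyRange 0 ((n : Nat) : Int) 1).foldl
        (runMin (fun r => -(PySem.List.pyGetD ((PySem.List.pyRange 0 ((n : Nat) : Int) 1).map g) r 0))) none with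
    | none => rw [hres] at hfold; simp at hfold
    | some r =>
      rw [hres] at hfold
      simp only [Option.map_some] at hfold
      have hpair := Option.some.inj hfold
      have h2 : r = (I : Int) := congrArg Prod.snd hpair
      have h1 : g r = M := congrArg Prod.fst hpair
      rw [← h2]; exact h1
  -- pyGet? ranking 0 = ranking.head?
  have hget : PySem.List.pyGet? (PySem.List.sorted (PySem.List.pyRange 0 ((n : Nat) : Int) 1)
      (fun r => -(PySem.List.pyGetD ((PySem.List.pyRange 0 ((n : Nat) : Int) 1).map g) r 0))) 0
      = some ((I : Nat) : Int) := by
    have h00 : (PySem.List.sorted (PySem.List.pyRange 0 ((n : Nat) : Int) 1)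
        (fun r => -(PySem.List.pyGetD ((PySem.List.pyRange 0 ((n : Nat) : Int) 1).map g) r 0)))[(0 : Nat)]?
        = some ((I : Nat) : Int) := by
      rw [← List.head?_eq_getElem?]; exact hhead
    have hcast := PySem.List.pyGet?_natCast (PySem.List.sorted (PySem.List.pyRange 0 ((n : Nat) : Int) 1)
      (fun r => -(PySem.List.pyGetD ((PySem.List.pyRange 0 ((n : Nat) : Int) 1).map g) r 0))) 0
    simpa using hcast.trans h00
  rw [hget]
  simp only [hgI, hgIM]
  show PySem.Int.toStr M ++ " " ++ ("project " ++ PySem.Int.toStr ((I : Int) + 1))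
      = PySem.Int.toStr M ++ " project " ++ PySem.Int.toStr ((I : Int) + 1)
  have hs : (" " : String) ++ "project " = " project " := rfl
  simp only [String.append_assoc]
  rw [← String.append_assoc (s₁ := " ") (s₂ := "project "), hs]
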